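-- pv_equiv track=rewrite | github.com/tumratde/prompt-to-pin | agent.py | extract_port_from_response
-- ===== SOURCE A (Python) =====
-- def extract_port_from_response(response):
--     """Extract Arduino port from response"""
--     response_text = str(response)
--     if "/dev/cu.usbserial" in response_text:
--         lines = response_text.split('\n')
--         for line in lines:
--             if "/dev/cu.usbserial" in line:
--                 parts = line.split()
--                 for part in parts:
--                     if "/dev/cu.usbserial" in part:
--                         return part.strip('.,()[]')
--     return None
-- ===== SOURCE B (Python) =====
-- def extract_port_from_response(response):
--     """Extract Arduino port from response"""
--     marker = "/dev/cu.usbserial"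
--     text = str(response)
--     j = text.find(marker)
--     if j == -1:
--         return None
--     start = j
--     while start > 0 and not text[start - 1].isspace():
--         start -= 1
--     end = j + len(marker)
--     while end < len(text) and not text[end].isspace():
--         end += 1
--     return text[start:end].strip('.,()[]')
-- ===== Notes on version B (the rewrite author's own statement) =====
-- stated objective: alternative
-- what changed: Instead of guarding with a whole-text substring test and then re-scanning line by line and whitespace-token by token (a line split plus a word split per matching line), B locates the first marker occurrence once with str.find and expands left and right to the enclosing whitespace-delimited token (the semantics of a regex token match around the marker), then strips the same punctuation.
import Mathlib
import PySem

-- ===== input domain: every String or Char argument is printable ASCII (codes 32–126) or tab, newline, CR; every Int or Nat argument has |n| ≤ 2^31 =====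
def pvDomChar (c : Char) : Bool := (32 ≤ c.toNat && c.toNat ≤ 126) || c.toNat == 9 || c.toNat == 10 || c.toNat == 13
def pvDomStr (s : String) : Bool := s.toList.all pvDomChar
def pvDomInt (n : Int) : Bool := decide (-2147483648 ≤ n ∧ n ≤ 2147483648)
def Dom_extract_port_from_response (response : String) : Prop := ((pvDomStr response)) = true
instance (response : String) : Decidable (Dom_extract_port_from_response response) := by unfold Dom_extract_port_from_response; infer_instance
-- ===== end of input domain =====

-- B replaces A's line-then-token nested rescans by one str.find of the marker plus a two-pointer
-- expansion to the enclosing whitespace-delimited token (objective: alternative algorithm, same cost).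

-- ===== PORT A =====
-- the marker and the strip character set, shared literals of both programs
def pvMarker : List Char := "/dev/cu.usbserial".toList
def pvPunct : List Char := ".,()[]".toList

-- inner loop: for part in parts: if marker in part: return part.strip('.,()[]')
def aParts : List (List Char) → Option String
  | [] => none
  | p :: rest =>
    if PySem.Chars.isIn pvMarker p then some (String.ofList (PySem.Chars.stripChars p pvPunct))
    else aParts rest

-- outer loop: for line in lines: if marker in line: (inner loop; on fall-through continue)
def aLines : List (List Char) → Option String
  | [] => none
  | l :: rest =>
    if PySem.Chars.isIn pvMarker l then
      match aParts (PySem.Chars.split₀ l) with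
      | some r => some r
      | none => aLines rest
    else aLines rest

def extract_port_from_response (response : String) : Option String :=
  -- response_text = str(response): identity on a str argument
  if PySem.Chars.isIn pvMarker response.toList then
    aLines (PySem.Chars.splitOn response.toList ['\n'])
  else none

-- ===== PORT B =====
-- while start > 0 and not text[start - 1].isspace(): start -= 1
-- (text[start-1] is always in range here since 0 < start; List.getD's default is never read)
def bLeft (text : List Char) : Nat → Nat
  | 0 => 0
  | s + 1 => if !PySem.Chars.isspace (text.getD s ' ') then bLeft text s else s + 1

-- while end < len(text) and not text[end].isspace(): end += 1
def bRight (text : List Char) (e : Nat) : Nat :=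
  if h : e < text.length then
    if !PySem.Chars.isspace (text.getD e ' ') then bRight text (e + 1) else e
  else e
termination_by text.length - e

def extract_port_from_response_alt (response : String) : Option String :=
  if PySem.Chars.find response.toList pvMarker = -1 then none
  else
    some (String.ofList (PySem.Chars.stripChars
      (PySem.List.slice response.toList
        (some ((bLeft response.toList (PySem.Chars.find response.toList pvMarker).toNat : Nat) : Int))
        (some ((bRight response.toList
          ((PySem.Chars.find response.toList pvMarker).toNat + pvMarker.length) : Nat) : Int)))
      pvPunct))

-- ===== PRECONDITION & SPEC =====
def Spec_extract_port_from_response (response : String) (out : Option String) : Prop := out = extract_port_from_response_alt response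
instance (response : String) (out : Option String) : Decidable (Spec_extract_port_from_response response out) := by unfold Spec_extract_port_from_response; infer_instance

-- ===== CLAIM (what is proved, stated in full; the proofs are below) =====
def Claim_equal_extract_port_from_response : Prop := ∀ (response : String), Dom_extract_port_from_response response → Spec_extract_port_from_response response (extract_port_from_response response)

-- ===== LEMMAS AND PROOFS =====

-- "non-space" predicate shared by split() and the two-pointer expansion
def nsp (c : Char) : Bool := !PySem.Chars.isspace c

-- the whitespace-delimited tokens of a char list, as a plain structural recursion
def toks : List Char → List (List Char)
  | [] => []
  | c :: rest =>
    if PySem.Chars.isspace c then toks rest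
    else List.takeWhile nsp (c :: rest) :: toks (List.dropWhile nsp rest)
termination_by cs => cs.length
decreasing_by
  · simp
  · have := List.length_dropWhile_le (p := nsp) (l := rest); simp; omega

-- the '\n'-split of a char list, as a plain structural recursion
def lns : List Char → List (List Char)
  | [] => [[]]
  | c :: rest => if c = '\n' then [] :: lns rest else (lns rest).modifyHead (c :: ·)

-- the maximal non-space suffix of a char list
def rtws (l : List Char) : List Char := (List.takeWhile nsp l.reverse).reverse

lemma toks_nil : toks [] = [] := by simp [toks]

lemma toks_cons_ws {c : Char} {rest : List Char} (hc : PySem.Chars.isspace c = true) :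
    toks (c :: rest) = toks rest := by
  simp [toks, hc]

lemma toks_cons_ns {c : Char} {rest : List Char} (hc : PySem.Chars.isspace c = false) :
    toks (c :: rest) = List.takeWhile nsp (c :: rest) :: toks (List.dropWhile nsp rest) := by
  simp [toks, hc]

lemma marker_eq : pvMarker = ['/', 'd', 'e', 'v', '/', 'c', 'u', '.', 'u', 's', 'b', 's', 'e', 'r', 'i', 'a', 'l'] := by
  simp [pvMarker]

lemma marker_nonws : ∀ c ∈ pvMarker, nsp c = true := by
  rw [marker_eq]
  intro c hc
  fin_cases hc <;> rfl

lemma marker_ne_nil : pvMarker ≠ [] := by rw [marker_eq]; simp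

lemma TW1 {p : Char → Bool} {xs ys : List Char} (h : ∀ c ∈ xs, p c = true) :
    List.takeWhile p (xs ++ ys) = xs ++ List.takeWhile p ys := by
  induction xs with
  | nil => simp
  | cons a t ih =>
    rw [List.cons_append, List.takeWhile_cons_of_pos (h a List.mem_cons_self),
      ih (fun c hc => h c (List.mem_cons_of_mem _ hc))]
    simp

lemma TW2 {p : Char → Bool} {c : Char} (xs ys : List Char) (h : p c = false) :
    List.takeWhile p (xs ++ c :: ys) = List.takeWhile p xs := by
  induction xs with
  | nil => simp [List.takeWhile_cons, h]
  | cons a t ih =>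
    by_cases ha : p a
    · simp [List.takeWhile_cons, ha, ih]
    · simp [List.takeWhile_cons, ha]

lemma TW3 {p : Char → Bool} {xs : List Char} (ys : List Char)
    (h : ∃ a ∈ xs, p a = false) :
    List.takeWhile p (xs ++ ys) = List.takeWhile p xs := by
  induction xs with
  | nil => obtain ⟨a, ha, _⟩ := h; simp at ha
  | cons b t ih =>
    by_cases hb : p b
    · obtain ⟨a, ha, hpa⟩ := h
      have hat : a ∈ t := by
        rcases List.mem_cons.mp ha with rfl | h'
        · rw [hb] at hpa; cases hpa
        · exact h'
      simp [List.takeWhile_cons, hb, ih ⟨a, hat, hpa⟩]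
    · simp [List.takeWhile_cons, hb]

lemma TWall {p : Char → Bool} {xs : List Char} (h : ∀ c ∈ xs, p c = true) :
    List.takeWhile p xs = xs := by
  have := TW1 (ys := ([] : List Char)) h
  simpa using this

lemma DWhead {p : Char → Bool} {l : List Char} {a : Char} {t : List Char}
    (h : List.dropWhile p l = a :: t) : p a = false := by
  induction l with
  | nil => simp at h
  | cons b r ih =>
    by_cases hb : p b
    · rw [List.dropWhile_cons_of_pos hb] at h; exact ih h
    · rw [List.dropWhile_cons_of_neg hb] at h
      cases h; simpa using hb

-- split₀ computes toks
lemma split0_go_eq (s : List Char) : ∀ (cur : List Char) (acc : List (List Char)),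
    PySem.Chars.split₀.go s cur acc =
      acc.reverse ++ (if cur = [] then toks s
        else (cur.reverse ++ List.takeWhile nsp s) :: toks (List.dropWhile nsp s)) := by
  induction s with
  | nil =>
    intro cur acc
    by_cases h : cur = [] <;>
      simp [PySem.Chars.split₀.go, h, toks, List.isEmpty_iff]
  | cons c rest ih =>
    intro cur acc
    by_cases hc : PySem.Chars.isspace c
    · have hnsp : nsp c = false := by simp [nsp, hc]
      by_cases hcur : cur = []
      · subst hcur
        simp [PySem.Chars.split₀.go, hc, ih, toks, List.isEmpty_iff,
          List.dropWhile_cons, hnsp]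
      · simp [PySem.Chars.split₀.go, hc, ih, hcur, toks, List.isEmpty_iff,
          List.takeWhile_cons, List.dropWhile_cons, hnsp]
    · have hnsp : nsp c = true := by simp [nsp, hc]
      by_cases hcur : cur = [] <;>
        simp [PySem.Chars.split₀.go, hc, ih, hcur, toks, List.isEmpty_iff,
          List.takeWhile_cons, List.dropWhile_cons, hnsp]

lemma split0_eq (s : List Char) : PySem.Chars.split₀ s = toks s := by
  have := split0_go_eq s [] []
  simpa [PySem.Chars.split₀] using this

-- lns head is the first line
lemma lns_head (q : List Char) : ∃ t, lns q = List.takeWhile (fun c => !(c = '\n' : Bool)) q :: t := by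
  induction q with
  | nil => exact ⟨[], rfl⟩
  | cons c rest ih =>
    obtain ⟨t, ht⟩ := ih
    by_cases hc : c = '\n'
    · exact ⟨lns rest, by simp [lns, hc, List.takeWhile_cons]⟩
    · exact ⟨t, by simp [lns, hc, List.takeWhile_cons, ht]⟩

lemma splitOn_go_eq : ∀ (fuel : Nat) (l cur : List Char) (acc : List (List Char)),
    l.length ≤ fuel →
    PySem.Chars.splitOn.go ['\n'] fuel l cur acc =
      acc.reverse ++ (lns l).modifyHead (cur.reverse ++ ·) := by
  intro fuel
  induction fuel with
  | zero =>
    intro l cur acc hl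
    have : l = [] := by
      cases l with
      | nil => rfl
      | cons a t => simp at hl
    subst this
    simp [PySem.Chars.splitOn.go, lns]
  | succ f ih =>
    intro l cur acc hl
    cases l with
    | nil => simp [PySem.Chars.splitOn.go, lns]
    | cons c rest =>
      by_cases hc : c = '\n'
      · subst hc
        have hpre : List.isPrefixOf ['\n'] ('\n' :: rest) = true := by
          simp [List.isPrefixOf]
        rw [PySem.Chars.splitOn.go]
        simp only [hpre, if_pos]
        rw [ih _ _ _ (by simpa using Nat.le_of_succ_le_succ (by simpa using hl))]
        obtain ⟨t, ht⟩ := lns_head rest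
        simp [lns, ht]
      · have hpre : List.isPrefixOf ['\n'] (c :: rest) = false := by
          simp [List.isPrefixOf]
          exact fun h => hc h.symm
        rw [PySem.Chars.splitOn.go]
        simp only [hpre]
        have hle : rest.length ≤ f := by simp at hl; omega
        rw [ih rest (c :: cur) acc hle]
        obtain ⟨t, ht⟩ := lns_head rest
        simp [lns, hc, ht]

lemma splitOn_eq (s : List Char) : PySem.Chars.splitOn s ['\n'] = lns s := by
  have := splitOn_go_eq (s.length + 1) s [] [] (by omega)
  rw [PySem.Chars.splitOn, this]
  cases h : lns s <;> simp

lemma lns_append {p q : List Char} (hp : ∀ c ∈ p, ¬ c = '\n') :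
    lns (p ++ q) = (lns q).modifyHead (p ++ ·) := by
  induction p with
  | nil =>
    obtain ⟨t, ht⟩ := lns_head q
    simp [ht]
  | cons c rest ih =>
    have hc : ¬ c = '\n' := hp c (List.mem_cons_self)
    rw [List.cons_append, lns]
    simp only [if_neg hc]
    rw [ih (fun x hx => hp x (List.mem_cons_of_mem _ hx))]
    obtain ⟨t, ht⟩ := lns_head q
    simp [ht]

lemma DW1 {p : Char → Bool} {xs ys : List Char} (h : ∀ c ∈ xs, p c = true) :
    List.dropWhile p (xs ++ ys) = List.dropWhile p ys := by
  induction xs with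
  | nil => simp
  | cons a t ih =>
    rw [List.cons_append, List.dropWhile_cons_of_pos (h a List.mem_cons_self)]
    exact ih (fun c hc => h c (List.mem_cons_of_mem _ hc))

lemma takeWhile_head_false {p : Char → Bool} {q : List Char}
    (hq : ∀ d t, q = d :: t → p d = false) : List.takeWhile p q = [] := by
  cases q with
  | nil => rfl
  | cons d t => rw [List.takeWhile_cons_of_neg (by simp [hq d t rfl])]

lemma dropWhile_head_false {p : Char → Bool} {q : List Char}
    (hq : ∀ d t, q = d :: t → p d = false) : List.dropWhile p q = q := by
  cases q with
  | nil => rfl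
  | cons d t => rw [List.dropWhile_cons_of_neg (by simp [hq d t rfl])]

lemma toks_app {p q : List Char} (hp : p ≠ []) (hall : ∀ c ∈ p, nsp c = true)
    (hq : ∀ d t, q = d :: t → nsp d = false) : toks (p ++ q) = p :: toks q := by
  cases p with
  | nil => exact absurd rfl hp
  | cons a p' =>
    have ha : nsp a = true := hall a List.mem_cons_self
    have hsp : PySem.Chars.isspace a = false := by
      simpa [nsp] using ha
    rw [List.cons_append, toks_cons_ns hsp]
    have hp' : ∀ c ∈ p', nsp c = true := fun c hc => hall c (List.mem_cons_of_mem _ hc)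
    rw [List.takeWhile_cons_of_pos ha, TW1 hp', takeWhile_head_false hq,
      DW1 hp', dropWhile_head_false hq]
    simp

lemma toks_infix (cs : List Char) : ∀ t ∈ toks cs, t <:+: cs := by
  fun_induction toks cs with
  | case1 => simp [toks_nil]
  | case2 c rest hc ih =>
    intro t ht
    exact (ih t ht).trans (List.infix_cons (List.infix_refl rest))
  | case3 c rest hc ih =>
    intro t ht
    rcases List.mem_cons.mp ht with rfl | h'
    · exact (List.takeWhile_prefix nsp).isInfix
    · have h1 : t <:+: List.dropWhile nsp rest := ih t h'
      have h2 : List.dropWhile nsp rest <:+: c :: rest :=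
        ((List.dropWhile_suffix nsp).trans (List.suffix_cons c rest)).isInfix
      exact h1.trans h2

lemma toks_flat_aux : ∀ (n : Nat) (cs : List Char), cs.length = n →
    toks cs = (lns cs).flatMap toks := by
  intro n
  induction n using Nat.strong_induction_on with
  | _ n IH =>
    intro cs hlen
    cases cs with
    | nil => simp [toks, lns]
    | cons c rest =>
      subst hlen
      by_cases hnl : c = '\n'
      · subst hnl
        have hsp : PySem.Chars.isspace '\n' = true := by decide
        rw [toks_cons_ws hsp, lns, if_pos rfl]
        rw [IH rest.length (by simp only [List.length_cons]; omega) rest rfl]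
        simp [toks_nil]
      · by_cases hc : PySem.Chars.isspace c
        · rw [toks_cons_ws hc, lns, if_neg hnl]
          obtain ⟨t, ht⟩ := lns_head rest
          rw [IH rest.length (by simp only [List.length_cons]; omega) rest rfl, ht]
          simp only [List.modifyHead_cons, List.flatMap_cons]
          rw [toks_cons_ws hc]
        · -- non-space head: the head token spans the first line's leading run
          have hnspc : nsp c = true := by simp [nsp, hc]
          have htwr : ∀ x ∈ List.takeWhile nsp rest, ¬ x = '\n' := by
            intro x hx
            have := List.mem_takeWhile_imp hx
            intro hxe; subst hxe; simp [nsp] at this; exact absurd this (by decide)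
          have hdwr : ∀ d t, List.dropWhile nsp rest = d :: t → nsp d = false := by
            intro d t hdt; exact DWhead hdt
          rw [toks_cons_ns (by simpa using hc), lns, if_neg hnl]
          have hrest : rest = List.takeWhile nsp rest ++ List.dropWhile nsp rest :=
            (List.takeWhile_append_dropWhile).symm
          obtain ⟨t', ht'⟩ := lns_head (List.dropWhile nsp rest)
          have hlns : lns rest = (lns (List.dropWhile nsp rest)).modifyHead
              (List.takeWhile nsp rest ++ ·) := by
            conv_lhs => rw [hrest]
            exact lns_append htwr
          have hIHdw := IH (List.dropWhile nsp rest).length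
            (by have := List.length_dropWhile_le (p := nsp) (l := rest); simp only [List.length_cons]; omega)
            (List.dropWhile nsp rest) rfl
          rw [hlns, ht']
          simp only [List.modifyHead_cons, List.flatMap_cons]
          have hq : ∀ d t, List.takeWhile (fun c => !(c = '\n' : Bool))
              (List.dropWhile nsp rest) = d :: t → nsp d = false := by
            intro d t hdt
            cases hdw : List.dropWhile nsp rest with
            | nil => rw [hdw] at hdt; simp at hdt
            | cons e etl =>
              rw [hdw, List.takeWhile_cons] at hdt
              by_cases he : e = '\n'
              · simp [he] at hdt
              · simp [he] at hdt
                rw [← hdt.1]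
                exact DWhead hdw
          have happ : toks ((c :: List.takeWhile nsp rest) ++
              List.takeWhile (fun c => !(c = '\n' : Bool)) (List.dropWhile nsp rest)) =
              (c :: List.takeWhile nsp rest) ::
                toks (List.takeWhile (fun c => !(c = '\n' : Bool)) (List.dropWhile nsp rest)) := by
            apply toks_app (by simp) _ hq
            intro x hx
            rcases List.mem_cons.mp hx with rfl | h'
            · exact hnspc
            · exact List.mem_takeWhile_imp h'
          have hcons : c :: (List.takeWhile nsp rest ++
              List.takeWhile (fun c => !(c = '\n' : Bool)) (List.dropWhile nsp rest)) =
              (c :: List.takeWhile nsp rest) ++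
              List.takeWhile (fun c => !(c = '\n' : Bool)) (List.dropWhile nsp rest) := by simp
          rw [hcons, happ, List.takeWhile_cons_of_pos hnspc]
          rw [hIHdw, ht']
          simp

lemma toks_flat (cs : List Char) : toks cs = (lns cs).flatMap toks :=
  toks_flat_aux cs.length cs rfl


lemma aParts_append (xs ys : List (List Char)) :
    aParts (xs ++ ys) = match aParts xs with
      | some r => some r
      | none => aParts ys := by
  induction xs with
  | nil => simp [aParts]
  | cons p rest ih =>
    by_cases h : PySem.Chars.isIn pvMarker p
    · simp [aParts, h]
    · simp [aParts, h, ih]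

lemma aParts_none {ts : List (List Char)} (h : ∀ t ∈ ts, PySem.Chars.isIn pvMarker t = false) :
    aParts ts = none := by
  induction ts with
  | nil => rfl
  | cons p rest ih =>
    simp [aParts, h p (List.mem_cons_self)]
    exact ih (fun t ht => h t (List.mem_cons_of_mem _ ht))

lemma isIn_false_of_token {t l : List Char} (hl : PySem.Chars.isIn pvMarker l = false)
    (ht : t ∈ toks l) : PySem.Chars.isIn pvMarker t = false := by
  cases hb : PySem.Chars.isIn pvMarker t with
  | false => rfl
  | true =>
    have h1 : pvMarker <:+: t := (PySem.Chars.isIn_iff_infix _ _).mp hb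
    have h2 : pvMarker <:+: l := h1.trans (toks_infix l t ht)
    rw [(PySem.Chars.isIn_iff_infix _ _).mpr h2] at hl
    cases hl

lemma aLines_eq (L : List (List Char)) : aLines L = aParts (L.flatMap toks) := by
  induction L with
  | nil => simp [aLines, aParts]
  | cons l rest ih =>
    rw [List.flatMap_cons, aParts_append]
    by_cases h : PySem.Chars.isIn pvMarker l
    · rw [aLines]
      simp only [h, if_true, split0_eq]
      cases haP : aParts (toks l) <;> simp [ih]
    · have hnone : aParts (toks l) = none :=
        aParts_none (fun t ht => isIn_false_of_token (by simpa using h) ht)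
      rw [aLines]
      simp only [h, if_false, Bool.false_eq_true, reduceIte, hnone, ih]

-- B's two while loops compute lengths of takeWhile runs
lemma bLeft_eq (text : List Char) : ∀ s, s ≤ text.length →
    bLeft text s = s - (List.takeWhile nsp (text.take s).reverse).length := by
  intro s
  induction s with
  | zero => intro _; simp [bLeft]
  | succ s ih =>
    intro hs
    have hs' : s < text.length := by omega
    have hget : text.getD s ' ' = text[s] := List.getD_eq_getElem text ' ' hs'
    have htake : (text.take (s + 1)).reverse = text[s] :: (text.take s).reverse := by
      rw [List.take_succ]
      simp [List.getElem?_eq_getElem hs']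
    have hLle : (List.takeWhile nsp (text.take s).reverse).length ≤ s := by
      have h1 := (List.takeWhile_prefix (l := (text.take s).reverse) nsp).length_le
      simpa [Nat.min_le_left, Nat.le_trans h1] using
        Nat.le_trans h1 (by simp [Nat.min_le_left])
    cases hb : nsp text[s] with
    | true =>
      rw [bLeft]
      simp only [hget, nsp] at hb ⊢
      rw [if_pos (by simpa using hb)]
      rw [ih (by omega), htake, List.takeWhile_cons_of_pos (by simpa [nsp] using hb)]
      simp only [List.length_cons]
      omega
    | false =>
      rw [bLeft]
      simp only [hget, nsp] at hb ⊢
      rw [if_neg (by simpa using hb)]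
      rw [htake, List.takeWhile_cons_of_neg (by simpa [nsp] using hb)]
      simp

lemma bRight_eq (text : List Char) : ∀ e,
    bRight text e = e + (List.takeWhile nsp (text.drop e)).length := by
  intro e
  fun_induction bRight text e with
  | case1 e h hb ih =>
    rw [List.drop_eq_getElem_cons h,
      List.takeWhile_cons_of_pos (by simpa [nsp, List.getElem?_eq_getElem h] using hb)]
    simp only [List.length_cons] at ih ⊢
    omega
  | case2 e h hb =>
    rw [List.drop_eq_getElem_cons h,
      List.takeWhile_cons_of_neg (by simpa [nsp, List.getElem?_eq_getElem h] using hb)]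
    simp
  | case3 e h =>
    rw [List.drop_eq_nil_of_le (by omega)]
    simp

-- MAIN: the nested scan returns the stripped token around the first occurrence
lemma main_tok : ∀ (n : Nat) (cs : List Char) (j : Nat), cs.length = n →
    pvMarker <+: cs.drop j →
    (∀ i < j, ¬ pvMarker <+: cs.drop i) →
    aParts (toks cs) = some (String.ofList (PySem.Chars.stripChars
      (rtws (cs.take j) ++ List.takeWhile nsp (cs.drop j)) pvPunct)) := by
  intro n
  induction n using Nat.strong_induction_on with
  | _ n IH =>
    intro cs j hlen hj hmin
    cases cs with
    | nil =>
      rw [List.drop_nil] at hj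
      exact absurd (List.prefix_nil.mp hj) marker_ne_nil
    | cons c rest =>
      subst hlen
      by_cases hc : PySem.Chars.isspace c
      · -- whitespace head: the first occurrence is strictly later
        cases j with
        | zero =>
          rw [List.drop_zero] at hj
          obtain ⟨t2, ht2⟩ := hj
          rw [marker_eq, List.cons_append] at ht2
          have hslash : c = '/' := (List.cons.injEq _ _ _ _).mp ht2 |>.1 |>.symm
          rw [hslash] at hc
          exact absurd hc (by decide)
        | succ j' =>
          have hj' : pvMarker <+: rest.drop j' := by simpa using hj
          have hmin' : ∀ i < j', ¬ pvMarker <+: rest.drop i := by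
            intro i hi
            have := hmin (i + 1) (by omega)
            simpa using this
          have hIH := IH rest.length (by simp only [List.length_cons]; omega)
            rest j' rfl hj' hmin'
          rw [toks_cons_ws hc, hIH]
          have h1 : rtws ((c :: rest).take (j' + 1)) = rtws (rest.take j') := by
            rw [List.take_succ_cons]
            unfold rtws
            rw [List.reverse_cons, TW2 _ [] (show nsp c = false by simp [nsp, hc])]
          rw [h1, List.drop_succ_cons]
      · -- non-space head
        have hnspc : nsp c = true := by simp [nsp, hc]
        have htoks : toks (c :: rest) =
            List.takeWhile nsp (c :: rest) :: toks (List.dropWhile nsp rest) :=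
          toks_cons_ns (by simpa using hc)
        have htwpre : List.takeWhile nsp (c :: rest) <+: (c :: rest) :=
          List.takeWhile_prefix nsp
        have htwall : ∀ x ∈ List.takeWhile nsp (c :: rest), nsp x = true :=
          fun x hx => List.mem_takeWhile_imp hx
        have hsplitCs : (c :: rest) =
            List.takeWhile nsp (c :: rest) ++ List.dropWhile nsp rest := by
          conv_lhs => rw [← List.takeWhile_append_dropWhile (p := nsp) (l := c :: rest)]
          rw [List.dropWhile_cons_of_pos hnspc]
        by_cases hIn : PySem.Chars.isIn pvMarker (List.takeWhile nsp (c :: rest)) = true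
        · -- the marker occurs inside the head token
          obtain ⟨s, t, hst⟩ := (PySem.Chars.isIn_iff_infix _ _).mp hIn
          have hocc : pvMarker <+: (c :: rest).drop s.length := by
            have hform : (c :: rest) =
                s ++ (pvMarker ++ (t ++ List.dropWhile nsp rest)) := by
              rw [hsplitCs, ← hst]; simp [List.append_assoc]
            rw [hform, List.drop_left]
            exact List.prefix_append _ _
          have hjs : j ≤ s.length :=
            Nat.le_of_not_lt (fun hlt => hmin s.length hlt hocc)
          have hjtw : j ≤ (List.takeWhile nsp (c :: rest)).length := by
            have : (List.takeWhile nsp (c :: rest)).length =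
                s.length + pvMarker.length + t.length := by
              rw [← hst]; simp; omega
            omega
          have htakeall : ∀ x ∈ (c :: rest).take j, nsp x = true := by
            intro x hx
            apply htwall
            have heq : (c :: rest).take j = (List.takeWhile nsp (c :: rest)).take j := by
              conv_lhs => rw [hsplitCs]
              rw [List.take_append, Nat.sub_eq_zero_of_le hjtw, List.take_zero,
                List.append_nil]
            rw [heq] at hx
            exact ((List.take_prefix _ _).sublist).mem hx
          have hpre : rtws ((c :: rest).take j) = (c :: rest).take j := by
            unfold rtws
            rw [TWall (fun x hx => htakeall x (List.mem_reverse.mp hx)),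
              List.reverse_reverse]
          have hTWdec : List.takeWhile nsp (c :: rest) =
              (c :: rest).take j ++ List.takeWhile nsp ((c :: rest).drop j) := by
            conv_lhs => rw [show (c :: rest) = (c :: rest).take j ++ (c :: rest).drop j from
              (List.take_append_drop j _).symm]
            exact TW1 htakeall
          rw [htoks]
          show aParts _ = _
          rw [aParts]
          simp only [hIn, if_true, hpre, ← hTWdec]
        · -- the marker occurs after the head token: recurse on the tail
          have hInf : PySem.Chars.isIn pvMarker (List.takeWhile nsp (c :: rest)) = false := by
            simpa using hIn
          have hlenle : j + pvMarker.length ≤ (c :: rest).length := by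
            have h1 := hj.length_le
            rw [List.length_drop] at h1
            have h2 : pvMarker <+: (c :: rest).drop j → (c :: rest).drop j ≠ [] := by
              intro hp hnil
              rw [hnil] at hp
              exact absurd (List.prefix_nil.mp hp) marker_ne_nil
            have h3 := h2 hj
            have h4 : j < (c :: rest).length := by
              by_contra hge
              rw [List.drop_eq_nil_of_le (by omega)] at h3
              exact h3 rfl
            omega
          set TW := List.takeWhile nsp (c :: rest) with hTWdef
          set DW := List.dropWhile nsp rest with hDWdef
          have hdropTwl : (c :: rest).drop TW.length = DW := by
            conv_lhs => rw [hsplitCs]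
            exact List.drop_left
          have hnot : ¬ (j + pvMarker.length ≤ TW.length) := by
            intro hle
            apply hIn
            rw [PySem.Chars.isIn_iff_infix]
            obtain ⟨u, hu⟩ := hj
            have hTWtake : TW = (c :: rest).take TW.length :=
              List.prefix_iff_eq_take.mp htwpre
            have hsub : pvMarker <+: ((c :: rest).drop j).take (TW.length - j) := by
              rw [← hu, List.take_append, List.take_of_length_le (by omega)]
              exact List.prefix_append _ _
            rw [List.take_drop] at hsub
            have hjt : j + (TW.length - j) = TW.length := by omega
            rw [hjt, ← hTWtake] at hsub
            exact hsub.isInfix.trans (List.drop_suffix j TW).isInfix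
          have htwlt : TW.length < j := by
            by_contra hge
            push_neg at hge
            have hDWne : DW ≠ [] := by
              intro hnil
              have : (c :: rest).length = TW.length := by
                rw [hsplitCs, hnil]; simp
              omega
            cases hDW : DW with
            | nil => exact absurd hDW hDWne
            | cons d dtl =>
              have hd : nsp d = false := DWhead (hDWdef ▸ hDW)
              obtain ⟨u, hu⟩ := hj
              have h1 : ((c :: rest).drop j).drop (TW.length - j) = DW := by
                rw [List.drop_drop]
                have : j + (TW.length - j) = TW.length := by omega
                rw [this, hdropTwl]
              have h2 : DW = pvMarker.drop (TW.length - j) ++ u := by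
                rw [← h1, ← hu, List.drop_append]
                have hz : TW.length - j - pvMarker.length = 0 := by omega
                rw [hz, List.drop_zero]
              cases hmk : pvMarker.drop (TW.length - j) with
              | nil =>
                have := congrArg List.length hmk
                simp only [List.length_drop, List.length_nil] at this
                have hml : 0 < pvMarker.length := by rw [marker_eq]; simp
                omega
              | cons a b =>
                have ha : a ∈ pvMarker := by
                  have hsub : pvMarker.drop (TW.length - j) ⊆ pvMarker :=
                    List.drop_subset (TW.length - j) pvMarker
                  exact hsub (by rw [hmk]; exact List.mem_cons_self)
                have hanws := marker_nonws a ha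
                rw [hmk, hDW] at h2
                have : d = a := ((List.cons.injEq _ _ _ _).mp (by simpa using h2)).1
                rw [this] at hd
                rw [hanws] at hd
                cases hd
          -- recurse on DW
          have hDWcons : ∃ d dtl, DW = d :: dtl := by
            cases hDW : DW with
            | nil =>
              have : pvMarker <+: DW.drop (j - TW.length) := by
                rw [← hdropTwl, List.drop_drop]
                have : TW.length + (j - TW.length) = j := by omega
                rw [this]
                exact hj
              rw [hDW] at this
              simp only [List.drop_nil] at this
              exact absurd (List.prefix_nil.mp this) marker_ne_nil
            | cons d dtl => exact ⟨d, dtl, rfl⟩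
          obtain ⟨d, dtl, hDW⟩ := hDWcons
          have hd : nsp d = false := DWhead (hDWdef ▸ hDW)
          have hjd : pvMarker <+: DW.drop (j - TW.length) := by
            rw [← hdropTwl, List.drop_drop]
            have : TW.length + (j - TW.length) = j := by omega
            rw [this]
            exact hj
          have hmind : ∀ i < j - TW.length, ¬ pvMarker <+: DW.drop i := by
            intro i hi
            rw [← hdropTwl, List.drop_drop]
            exact hmin (TW.length + i) (by omega)
          have hDWlen : DW.length < (c :: rest).length := by
            have := List.length_dropWhile_le (p := nsp) (l := rest)
            rw [hDWdef]
            simp only [List.length_cons]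
            omega
          have hIHd := IH DW.length hDWlen DW (j - TW.length) rfl hjd hmind
          rw [htoks]
          show aParts _ = _
          rw [aParts]
          simp only [hInf, Bool.false_eq_true, if_false, reduceIte]
          rw [hIHd]
          -- align the two right-hand sides
          have hdrop : DW.drop (j - TW.length) = (c :: rest).drop j := by
            rw [← hdropTwl, List.drop_drop]
            have : TW.length + (j - TW.length) = j := by omega
            rw [this]
          have htake : (c :: rest).take j = TW ++ DW.take (j - TW.length) := by
            conv_lhs => rw [hsplitCs]
            rw [List.take_append, List.take_of_length_le (by omega)]
          have hrtws : rtws ((c :: rest).take j) = rtws (DW.take (j - TW.length)) := by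
            rw [htake]
            unfold rtws
            rw [List.reverse_append]
            rw [TW3 _ ⟨d, by
              rw [List.mem_reverse]
              rw [hDW, List.take_cons (by omega)]
              exact List.mem_cons_self, hd⟩]
          rw [hdrop, hrtws]

-- ===== VERDICT (by name: the statement is the Claim_ definition above) =====
-- the B-side expression equals the token around the first occurrence
lemma b_side (cs : List Char) (hinf : pvMarker <:+: cs) :
    PySem.List.slice cs
      (some ((bLeft cs (PySem.Chars.find cs pvMarker).toNat : Nat) : Int))
      (some ((bRight cs ((PySem.Chars.find cs pvMarker).toNat + pvMarker.length) : Nat) : Int)) =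
    rtws (cs.take (PySem.Chars.find cs pvMarker).toNat) ++
      List.takeWhile nsp (cs.drop (PySem.Chars.find cs pvMarker).toNat) := by
  have hnn : 0 ≤ PySem.Chars.find cs pvMarker :=
    (PySem.Chars.find_nonneg_iff _ _).mpr hinf
  obtain ⟨hj, hmin⟩ := PySem.Chars.find_spec hnn
  set J := (PySem.Chars.find cs pvMarker).toNat with hJdef
  obtain ⟨u, hu⟩ := hj
  have hJlt : J < cs.length := by
    by_contra hge
    rw [List.drop_eq_nil_of_le (by omega)] at hu
    have := congrArg List.length hu
    simp only [List.length_append, List.length_nil] at this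
    have : pvMarker.length = 0 := by omega
    rw [marker_eq] at this
    simp at this
  have hlenJ : pvMarker.length + u.length = cs.length - J := by
    have := congrArg List.length hu
    simp only [List.length_append, List.length_drop] at this
    omega
  set L := (List.takeWhile nsp (cs.take J).reverse).length with hLdef
  have hylen : (cs.take J).length = J := by
    rw [List.length_take]
    omega
  have hLle : L ≤ J := by
    have h1 := (List.takeWhile_prefix (l := (cs.take J).reverse) nsp).length_le
    rw [List.length_reverse, hylen] at h1
    exact h1
  have hbl : bLeft cs J = J - L := bLeft_eq cs J (by omega)
  have hdropJm : cs.drop (J + pvMarker.length) = u := by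
    have h1 : cs.drop (J + pvMarker.length) = (cs.drop J).drop pvMarker.length := by
      rw [List.drop_drop]
    rw [h1, ← hu, List.drop_left]
  have hpost : List.takeWhile nsp (cs.drop J) = pvMarker ++ List.takeWhile nsp u := by
    rw [← hu, TW1 marker_nonws]
  have hbr : bRight cs (J + pvMarker.length) =
      J + (List.takeWhile nsp (cs.drop J)).length := by
    rw [bRight_eq, hdropJm, hpost, List.length_append]
    omega
  rw [hbl, hbr, PySem.List.slice_natCast]
  -- the selected span is [J - L, J + |post|)
  have hspan : J + (List.takeWhile nsp (cs.drop J)).length - (J - L) =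
      L + (List.takeWhile nsp (cs.drop J)).length := by omega
  rw [hspan]
  -- decompose take J cs into its non-space tail
  have hy : cs.take J =
      (List.dropWhile nsp (cs.take J).reverse).reverse ++ rtws (cs.take J) := by
    conv_lhs => rw [← List.reverse_reverse (cs.take J),
      ← List.takeWhile_append_dropWhile (p := nsp) (l := (cs.take J).reverse)]
    rw [List.reverse_append]
    rfl
  have hu'len : (List.dropWhile nsp (cs.take J).reverse).reverse.length = J - L := by
    have h1 : (List.takeWhile nsp (cs.take J).reverse).length +
        (List.dropWhile nsp (cs.take J).reverse).length = J := by
      have := congrArg List.length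
        (List.takeWhile_append_dropWhile (p := nsp) (l := (cs.take J).reverse))
      simp only [List.length_append, List.length_reverse, hylen] at this
      omega
    simp only [List.length_reverse]
    omega
  have hrtwsL : (rtws (cs.take J)).length = L := by
    simp only [rtws, List.length_reverse, hLdef]
  have hcs : cs = (List.dropWhile nsp (cs.take J).reverse).reverse ++
      (rtws (cs.take J) ++ cs.drop J) := by
    conv_lhs => rw [← List.take_append_drop J cs]
    rw [← List.append_assoc, ← hy]
  have hdropJL : cs.drop (J - L) = rtws (cs.take J) ++ cs.drop J := by
    conv_lhs => rw [hcs, ← hu'len]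
    exact List.drop_left
  rw [hdropJL, List.take_append, List.take_of_length_le (by omega), hrtwsL]
  have hz : L + (List.takeWhile nsp (cs.drop J)).length - L =
      (List.takeWhile nsp (cs.drop J)).length := by omega
  rw [hz]
  have hpostTake : (cs.drop J).take (List.takeWhile nsp (cs.drop J)).length =
      List.takeWhile nsp (cs.drop J) :=
    (List.prefix_iff_eq_take.mp (List.takeWhile_prefix nsp)).symm
  rw [hpostTake]

-- ===== VERDICT (by name: the statement is the Claim_ definition above) =====
theorem extract_port_from_response_spec : Claim_equal_extract_port_from_response := by
  intro response _hdom
  unfold Spec_extract_port_from_response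
  by_cases hIn : PySem.Chars.isIn pvMarker response.toList = true
  · have hinf := (PySem.Chars.isIn_iff_infix _ _).mp hIn
    have hnn : 0 ≤ PySem.Chars.find response.toList pvMarker :=
      (PySem.Chars.find_nonneg_iff _ _).mpr hinf
    have hfne : ¬ PySem.Chars.find response.toList pvMarker = -1 := by omega
    obtain ⟨hj, hmin⟩ := PySem.Chars.find_spec hnn
    simp only [extract_port_from_response, extract_port_from_response_alt, hIn, if_true,
      if_neg hfne]
    rw [splitOn_eq, aLines_eq, ← toks_flat]
    rw [main_tok response.toList.length response.toList
      (PySem.Chars.find response.toList pvMarker).toNat rfl hj hmin]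
    rw [b_side response.toList hinf]
  · have hInf : PySem.Chars.isIn pvMarker response.toList = false := by
      simpa using hIn
    have hninf := (PySem.Chars.isIn_eq_false_iff _ _).mp hInf
    have hfeq : PySem.Chars.find response.toList pvMarker = -1 :=
      (PySem.Chars.find_eq_neg_one_iff _ _).mpr hninf
    simp only [extract_port_from_response, extract_port_from_response_alt, hInf,
      Bool.false_eq_true, if_false, hfeq, if_pos, reduceIte]
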